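-- pv_equiv track=rewrite | github.com/S-SIRIUS/Programmers | 프로그래머스/2/138476. 귤 고르기/귤 고르기.py | solution
-- ===== SOURCE A (Python) =====
-- from collections import Counter
--
-- def solution(k, tangerine):
--     t_count = Counter(tangerine)
--     sorted_counts = sorted(t_count.values(), reverse=True)
--
--     total = 0
--     kinds = 0
--
--     for count in sorted_counts:
--         total += count
--         kinds += 1
--         if total >= k:
--             break
--
--     return kinds
-- ===== SOURCE B (Python) =====
-- def solution(k, tangerine):
--     freq = {}
--     for t in tangerine:
--         freq[t] = freq.get(t, 0) + 1
--     buckets = {}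
--     M = 0
--     for c in freq.values():
--         buckets[c] = buckets.get(c, 0) + 1
--         if M < c:
--             M = c
--     total = 0
--     kinds = 0
--     for c in range(M, 0, -1):
--         for _ in range(buckets.get(c, 0)):
--             total += c
--             kinds += 1
--             if total >= k:
--                 return kinds
--     return kinds
-- ===== Notes on version B (the rewrite author's own statement) =====
-- stated objective: alternative
-- what changed: Replaces the comparison sort of the frequency values by a count-of-counts bucket traversed from the maximum frequency downwards, so no sorting is done.
import Mathlib
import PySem

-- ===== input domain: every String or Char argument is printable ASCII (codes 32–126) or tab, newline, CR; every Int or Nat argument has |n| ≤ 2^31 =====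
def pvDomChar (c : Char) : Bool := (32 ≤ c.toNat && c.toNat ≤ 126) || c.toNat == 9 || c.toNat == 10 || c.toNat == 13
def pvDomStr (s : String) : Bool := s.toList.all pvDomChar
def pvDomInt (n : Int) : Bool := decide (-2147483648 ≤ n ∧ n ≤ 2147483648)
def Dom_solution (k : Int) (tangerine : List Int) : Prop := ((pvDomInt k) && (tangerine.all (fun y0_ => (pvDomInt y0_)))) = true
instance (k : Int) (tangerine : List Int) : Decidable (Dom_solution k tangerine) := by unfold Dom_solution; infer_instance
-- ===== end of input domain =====

-- B replaces the comparison sort of the frequency values by a count-of-counts bucket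
-- traversed from the maximum frequency downwards (objective: alternative algorithm, no sort).

-- ===== PORT A =====
-- A's for-loop with break: total += count; kinds += 1; break when total >= k
def aLoop (k : Int) : List Int → Int → Int → Int
  | [], _, kinds => kinds
  | c :: rest, total, kinds =>
    if total + c ≥ k then kinds + 1
    else aLoop k rest (total + c) (kinds + 1)

def solution (k : Int) (tangerine : List Int) : Int :=
  let t_count := PySem.Dict.counter tangerine
  let sorted_counts := PySem.List.sorted t_count.values (fun x => x) true
  aLoop k sorted_counts 0 0

-- ===== PORT B =====
-- inner 'for _ in range(buckets.get(c, 0))' with early return (.inl = returned kinds)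
def bInner (k c : Int) : Nat → Int → Int → Sum Int (Int × Int)
  | 0, total, kinds => .inr (total, kinds)
  | n + 1, total, kinds =>
    if total + c ≥ k then .inl (kinds + 1)
    else bInner k c n (total + c) (kinds + 1)

-- outer 'for c in range(M, 0, -1)'
def bOuter (k : Int) (buckets : PySem.Dict Int Int) : List Int → Int → Int → Int
  | [], _, kinds => kinds
  | c :: cs, total, kinds =>
    match bInner k c (buckets.getD c 0).toNat total kinds with
    | .inl ans => ans
    | .inr (total', kinds') => bOuter k buckets cs total' kinds'

def solution_alt (k : Int) (tangerine : List Int) : Int :=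
  let freq := tangerine.foldl (fun d t => d.insert t (d.getD t 0 + 1)) PySem.Dict.empty
  let bm := freq.values.foldl
      (fun (bm : PySem.Dict Int Int × Int) c =>
        (bm.1.insert c (bm.1.getD c 0 + 1), if bm.2 < c then c else bm.2))
      (PySem.Dict.empty, 0)
  bOuter k bm.1 (PySem.List.pyRange bm.2 0 (-1)) 0 0

-- ===== PRECONDITION & SPEC =====
def Spec_solution (k : Int) (tangerine : List Int) (out : Int) : Prop := out = solution_alt k tangerine
instance (k : Int) (tangerine : List Int) (out : Int) : Decidable (Spec_solution k tangerine out) := by unfold Spec_solution; infer_instance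

-- ===== CLAIM (what is proved, stated in full; the proofs are below) =====
def Claim_equal_solution : Prop := ∀ (k : Int) (tangerine : List Int), Dom_solution k tangerine → Spec_solution k tangerine (solution k tangerine)

-- ===== LEMMAS AND PROOFS =====

-- the descending multiset of counts that bOuter effectively traverses
def bucketList (buckets : PySem.Dict Int Int) (M : Int) : List Int :=
  (PySem.List.pyRange M 0 (-1)).flatMap (fun c => List.replicate (buckets.getD c 0).toNat c)

-- the inner repeat-n-times loop is aLoop on a replicate prefix
theorem bInner_eq_aLoop (k c : Int) (n : Nat) (rest : List Int) (total kinds : Int) :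
    (match bInner k c n total kinds with
     | .inl ans => ans
     | .inr (t, ki) => aLoop k rest t ki) =
      aLoop k (List.replicate n c ++ rest) total kinds := by
  induction n generalizing total kinds with
  | zero => simp [bInner, List.replicate]
  | succ m ih =>
    by_cases h : total + c ≥ k
    · simp [bInner, h, List.replicate_succ, aLoop]
    · simp only [bInner, if_neg h, List.replicate_succ, List.cons_append, aLoop,
        ge_iff_le]
      exact ih _ _

theorem bOuter_eq_aLoop (k : Int) (b : PySem.Dict Int Int) (cs : List Int)
    (total kinds : Int) :
    bOuter k b cs total kinds =
      aLoop k (cs.flatMap (fun c => List.replicate (b.getD c 0).toNat c)) total kinds := by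
  induction cs generalizing total kinds with
  | nil => simp [bOuter, aLoop]
  | cons c cs ih =>
    rw [List.flatMap_cons, bOuter, ← bInner_eq_aLoop k c _ _ total kinds]
    cases bInner k c (b.getD c 0).toNat total kinds with
    | inl ans => rfl
    | inr st => cases st with | mk t ki => simp [ih]

-- the combined (buckets, M) fold splits into two independent folds
theorem bm_fold_split (vals : List Int) (d : PySem.Dict Int Int) (m : Int) :
    vals.foldl
      (fun (bm : PySem.Dict Int Int × Int) c =>
        (bm.1.insert c (bm.1.getD c 0 + 1), if bm.2 < c then c else bm.2)) (d, m) =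
      (vals.foldl (fun d c => d.insert c (d.getD c 0 + 1)) d,
       vals.foldl (fun m c => if m < c then c else m) m) := by
  induction vals generalizing d m with
  | nil => rfl
  | cons v vs ih => simp [List.foldl, ih]

theorem maxfold_ge (vals : List Int) (m : Int) :
    m ≤ vals.foldl (fun m c => if m < c then c else m) m := by
  induction vals generalizing m with
  | nil => simp
  | cons v vs ih =>
    simp only [List.foldl]
    calc m ≤ (if m < v then v else m) := by split <;> omega
      _ ≤ _ := ih _

theorem le_maxfold (vals : List Int) (m v : Int) (hv : v ∈ vals) :
    v ≤ vals.foldl (fun m c => if m < c then c else m) m := by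
  induction vals generalizing m with
  | nil => cases hv
  | cons w ws ih =>
    simp only [List.foldl]
    rcases List.mem_cons.mp hv with rfl | hv
    · calc v ≤ (if m < v then v else m) := by split <;> omega
        _ ≤ _ := maxfold_ge _ _
    · exact ih _ hv

-- every value of a counter is the count of an occurring element, hence ≥ 1
theorem counter_values_pos (xs : List Int) (v : Int)
    (hv : v ∈ (PySem.Dict.counter xs).values) : 1 ≤ v := by
  have hval : (PySem.Dict.counter xs).values =
      (PySem.Set.ofList xs).map (fun x => (List.count x xs : Int)) := by
    simp only [PySem.Dict.values, PySem.Dict.items_counter, List.map_map]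
    rfl
  rw [hval] at hv
  obtain ⟨x, hx, rfl⟩ := List.mem_map.mp hv
  have hpos : 0 < List.count x xs :=
    List.count_pos_iff.mpr ((PySem.Set.mem_ofList xs x).mp hx)
  exact_mod_cast hpos

-- counts of the bucket list
theorem count_flatMap_replicate (cs : List Int) (f : Int → Nat) (v : Int) (hnd : cs.Nodup) :
    (cs.flatMap (fun c => List.replicate (f c) c)).count v =
      if v ∈ cs then f v else 0 := by
  induction cs with
  | nil => simp
  | cons c cs ih =>
    rw [List.flatMap_cons, List.count_append, ih (List.nodup_cons.mp hnd).2]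
    rcases eq_or_ne v c with rfl | hne
    · simp [(List.nodup_cons.mp hnd).1]
    · simp [List.count_replicate, Ne.symm hne, hne, List.mem_cons]

theorem bucketList_perm (tangerine : List Int) :
    (bucketList (PySem.Dict.counter ((PySem.Dict.counter tangerine).values))
        ((PySem.Dict.counter tangerine).values.foldl (fun m c => if m < c then c else m) 0)).Perm
      (PySem.Dict.counter tangerine).values := by
  set vals := (PySem.Dict.counter tangerine).values with hvals
  rw [List.perm_iff_count]
  intro v
  unfold bucketList
  rw [count_flatMap_replicate _ _ _ ?nd]
  case nd =>
    rw [PySem.List.pyRange_neg_one_eq_reverse]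
    exact List.nodup_reverse.mpr (PySem.List.nodup_pyRange_one _ _)
  simp only [PySem.List.mem_pyRange_neg_one]
  split
  · rw [PySem.Dict.getD_counter]
    simp
  · rename_i hnot
    symm
    rw [List.count_eq_zero]
    intro hvv
    exact hnot ⟨by have := counter_values_pos tangerine v (hvals ▸ hvv); omega,
      le_maxfold _ _ _ hvv⟩

theorem flatMap_replicate_pairwise (cs : List Int) (f : Int → Nat)
    (hpw : cs.Pairwise (fun a c => c < a)) :
    (cs.flatMap (fun c => List.replicate (f c) c)).Pairwise (fun a c => c ≤ a) := by
  induction cs with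
  | nil => simp
  | cons c cs ih =>
    rw [List.flatMap_cons, List.pairwise_append]
    refine ⟨?_, ih (List.pairwise_cons.mp hpw).2, ?_⟩
    · exact List.pairwise_replicate.mpr (Or.inr le_rfl)
    · intro a ha x hx
      obtain rfl := List.eq_of_mem_replicate ha
      obtain ⟨c', hc', hx'⟩ := List.mem_flatMap.mp hx
      obtain rfl := List.eq_of_mem_replicate hx'
      exact le_of_lt ((List.pairwise_cons.mp hpw).1 _ hc')

theorem bucketList_pairwise (b : PySem.Dict Int Int) (M : Int) :
    (bucketList b M).Pairwise (fun a c => c ≤ a) := by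
  apply flatMap_replicate_pairwise
  rw [PySem.List.pyRange_neg_one_eq_reverse, List.pairwise_reverse]
  exact PySem.List.pairwise_lt_pyRange_one _ _

theorem sorted_eq_bucketList (tangerine : List Int) :
    PySem.List.sorted (PySem.Dict.counter tangerine).values (fun x => x) true =
      bucketList (PySem.Dict.counter ((PySem.Dict.counter tangerine).values))
        ((PySem.Dict.counter tangerine).values.foldl (fun m c => if m < c then c else m) 0) := by
  refine List.Perm.eq_of_pairwise (le := fun a c : Int => c ≤ a)
    (fun a b _ _ h1 h2 => le_antisymm h2 h1)
    (PySem.List.sorted_pairwise_rev _ _)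
    (bucketList_pairwise _ _)
    ((PySem.List.sorted_perm _ _ _).trans (bucketList_perm tangerine).symm)

-- ===== VERDICT (by name: the statement is the Claim_ definition above) =====
theorem solution_spec : Claim_equal_solution := by
  intro k tangerine _
  unfold Spec_solution solution solution_alt
  simp only []
  rw [PySem.Dict.foldl_insert_getD_add_one_eq_counter, bm_fold_split, bOuter_eq_aLoop,
    sorted_eq_bucketList]
  rfl
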